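-- pv_equiv track=rewrite | github.com/danyulhfree/sc | StripchatRecorder.py | get_mouflon_pkeys
-- ===== SOURCE A (Python) =====
-- def get_mouflon_pkeys(m3u8_content: str) -> list:
--     """Extract all psch/pkey pairs from m3u8 content."""
--     keys = []
--     for line in m3u8_content.splitlines():
--         if line.startswith('#EXT-X-MOUFLON:PSCH:'):
--             parts = line.split(':')
--             if len(parts) >= 4:
--                 psch = parts[2]  # v1 or v2
--                 pkey = parts[3].strip()
--                 keys.append((psch, pkey))
--     return keys
-- ===== SOURCE B (Python) =====
-- def get_mouflon_pkeys(m3u8_content: str) -> list: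
--     """Extract all psch/pkey pairs by a single character-level scan (no splitlines/split)."""
--     PREFIX = '#EXT-X-MOUFLON:PSCH:'
--     keys = []
--     s = m3u8_content
--     n = len(s)
--     i = 0
--     while i < n:
--         # try to match the tag at the start of the current line, char by char
--         p = 0
--         while p < 20 and i + p < n and s[i + p] == PREFIX[p]:
--             p += 1
--         if p == 20:
--             j = i + 20
--             start = j
--             while j < n and s[j] != ':' and s[j] != '\r' and s[j] != '\n':
--                 j += 1
--             if j < n and s[j] == ':':
--                 psch = s[start:j]
--                 j += 1
--                 k = j
--                 while k < n and s[k] != ':' and s[k] != '\r' and s[k] != '\n':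
--                     k += 1
--                 keys.append((psch, s[j:k].strip()))
--                 i = k
--             else:
--                 i = j
--         else:
--             i += p
--         # skip the rest of the line and its terminator
--         while i < n and s[i] != '\r' and s[i] != '\n':
--             i += 1
--         if i < n:
--             if s[i] == '\r' and i + 1 < n and s[i + 1] == '\n':
--                 i += 2
--             else:
--                 i += 1
--     return keys
-- ===== Notes on version B (the rewrite author's own statement) =====
-- stated objective: alternative
-- what changed: B replaces A's two-level decomposition (splitlines, then split(':') into a field list per line, then length guard and indexing) by one character-level state machine over the raw string: it matches the 20-char tag char by char at each line start, scans the psch field up to the first colon and the pkey field up to the next colon or line break, and skips to the next line itself, never materialising a list of lines or fields.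
import Mathlib
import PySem

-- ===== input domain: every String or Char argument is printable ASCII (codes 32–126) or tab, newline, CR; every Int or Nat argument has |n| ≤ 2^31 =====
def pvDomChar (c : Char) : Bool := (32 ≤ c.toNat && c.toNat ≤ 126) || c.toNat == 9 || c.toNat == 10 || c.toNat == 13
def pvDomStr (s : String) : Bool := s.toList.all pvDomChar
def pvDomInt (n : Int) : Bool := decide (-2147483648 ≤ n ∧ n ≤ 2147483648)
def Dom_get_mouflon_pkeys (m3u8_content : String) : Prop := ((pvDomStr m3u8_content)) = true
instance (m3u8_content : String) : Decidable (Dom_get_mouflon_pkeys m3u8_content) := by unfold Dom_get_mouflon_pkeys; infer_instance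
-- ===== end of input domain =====

-- B replaces A's splitlines + split(':') pipeline by one character-level state machine; objective: alternative (same O(n) asymptotics, not claimed faster).

-- ===== PORT A =====
-- loop body of A: if the line carries the tag, split it on ':' and, given >= 4 fields, append (parts[2], parts[3].strip())
def pvStepA (keys : List (String × String)) (line : String) : List (String × String) :=
  if PySem.Str.startswith line "#EXT-X-MOUFLON:PSCH:" then
    let parts := (PySem.Str.split? line ":").getD []   -- sep ":" is nonempty, so split? is always `some`
    if 4 ≤ parts.length then
      keys ++ [(parts.getD 2 "", PySem.Str.strip (parts.getD 3 ""))]  -- indices 2,3 in range by the guard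
    else keys
  else keys

def get_mouflon_pkeys (m3u8_content : String) : List (String × String) :=
  (PySem.Str.splitlines m3u8_content).foldl pvStepA []

-- ===== PORT B =====
-- the tag, as the character list B compares against char by char
def pvTag : List Char := "#EXT-X-MOUFLON:PSCH:".toList

-- inner while of B: match the tag char by char; (all 20 matched?, remainder from the stop position)
def pvPref : List Char → List Char → Bool × List Char
  | [], s => (true, s)
  | _ :: _, [] => (false, [])
  | p :: ps, c :: cs => if c = p then pvPref ps cs else (false, c :: cs)

-- inner while of B: collect chars up to ':' or the line break; (field, remainder from the stop char)
def pvTakeField : List Char → List Char × List Char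
  | [] => ([], [])
  | c :: cs =>
    if c = ':' ∨ c = '\r' ∨ c = '\n' then ([], c :: cs)
    else let p := pvTakeField cs; (c :: p.1, p.2)

-- final while of B: skip the rest of the line and its terminator ('\r\n' counts as one)
def pvSkipLine : List Char → List Char
  | [] => []
  | c :: cs =>
    if c = '\n' then cs
    else if c = '\r' then (if cs.head? = some '\n' then cs.tail else cs)
    else pvSkipLine cs

-- length bounds cited by pvScanB's termination proof
theorem pvPref_snd_le (pat s : List Char) : (pvPref pat s).2.length ≤ s.length := by
  induction pat generalizing s with
  | nil => simp [pvPref]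
  | cons p ps ih =>
    cases s with
    | nil => simp [pvPref]
    | cons c cs =>
      by_cases h : c = p
      · simp only [pvPref, if_pos h]
        exact le_trans (ih cs) (by simp)
      · simp [pvPref, h]

theorem pvTakeField_snd_le (s : List Char) : (pvTakeField s).2.length ≤ s.length := by
  induction s with
  | nil => simp [pvTakeField]
  | cons c cs ih =>
    by_cases h : c = ':' ∨ c = '\r' ∨ c = '\n'
    · simp [pvTakeField, h]
    · simp only [pvTakeField, if_neg h]
      exact le_trans ih (by simp)

theorem pvSkipLine_le : ∀ (s : List Char), (pvSkipLine s).length ≤ s.length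
  | [] => by simp [pvSkipLine]
  | c :: cs => by
    have ih := pvSkipLine_le cs
    rw [pvSkipLine.eq_def]
    dsimp only
    split_ifs with h1 h2 h3
    · simp
    · cases cs <;> simp_all <;> omega
    · simp
    · exact le_trans ih (by simp)

theorem pvSkipLine_length_lt (s : List Char) (n : Nat) (h : s.length ≤ n + 1) :
    (pvSkipLine s).length < n + 1 := by
  cases s with
  | nil => simp [pvSkipLine]
  | cons c cs =>
    rw [pvSkipLine.eq_def]; dsimp only
    have ih := pvSkipLine_le cs
    simp at h
    split_ifs with h1 h2 h3
    · omega
    · cases cs <;> simp_all <;> omega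
    · omega
    · omega

-- main loop of B: one pass over the characters, the line handled in place
def pvScanB : List Char → List (String × String)
  | [] => []
  | c :: cs =>
    let pr := pvPref pvTag (c :: cs)
    if pr.1 then
      let f1 := pvTakeField pr.2
      if f1.2.head? = some ':' then
        let f2 := pvTakeField f1.2.tail
        (String.ofList f1.1, PySem.Str.strip (String.ofList f2.1)) :: pvScanB (pvSkipLine f2.2)
      else pvScanB (pvSkipLine f1.2)
    else pvScanB (pvSkipLine pr.2)
termination_by s => s.length
decreasing_by
  · refine pvSkipLine_length_lt _ _ ?_
    have h1 := pvPref_snd_le pvTag (c :: cs)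
    have h2 := pvTakeField_snd_le (pvPref pvTag (c :: cs)).2
    have h3 := pvTakeField_snd_le (pvTakeField (pvPref pvTag (c :: cs)).2).2.tail
    have h4 : (pvTakeField (pvPref pvTag (c :: cs)).2).2.tail.length ≤
        (pvTakeField (pvPref pvTag (c :: cs)).2).2.length := by
      cases (pvTakeField (pvPref pvTag (c :: cs)).2).2 <;> simp
    simp at h1 ⊢; omega
  · refine pvSkipLine_length_lt _ _ ?_
    have h1 := pvPref_snd_le pvTag (c :: cs)
    have h2 := pvTakeField_snd_le (pvPref pvTag (c :: cs)).2
    simp at h1 ⊢; omega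
  · refine pvSkipLine_length_lt _ _ ?_
    have h1 := pvPref_snd_le pvTag (c :: cs)
    simp at h1 ⊢; omega

def get_mouflon_pkeys_alt (m3u8_content : String) : List (String × String) :=
  pvScanB m3u8_content.toList

-- ===== PRECONDITION & SPEC =====
def Spec_get_mouflon_pkeys (m3u8_content : String) (out : List (String × String)) : Prop := out = get_mouflon_pkeys_alt m3u8_content
instance (m3u8_content : String) (out : List (String × String)) : Decidable (Spec_get_mouflon_pkeys m3u8_content out) := by unfold Spec_get_mouflon_pkeys; infer_instance

-- ===== CLAIM (what is proved, stated in full; the proofs are below) =====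
def Claim_equal_get_mouflon_pkeys : Prop := ∀ (m3u8_content : String), Dom_get_mouflon_pkeys m3u8_content → Spec_get_mouflon_pkeys m3u8_content (get_mouflon_pkeys m3u8_content)

-- ===== LEMMAS AND PROOFS =====

-- ---- A-side: single-character split, characterised recursively ----
def pvSplit1 : List Char → List (List Char)
  | [] => [[]]
  | c :: rest => if c = ':' then [] :: pvSplit1 rest else (pvSplit1 rest).modifyHead (c :: ·)

theorem pvSplit1_ne_nil (cs : List Char) : pvSplit1 cs ≠ [] := by
  induction cs with
  | nil => simp [pvSplit1]
  | cons c rest ih =>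
    simp only [pvSplit1]
    split
    · simp
    · cases h : pvSplit1 rest with
      | nil => exact absurd h ih
      | cons hd tl => simp [h, List.modifyHead]

theorem pvSplitOn_go_eq (fuel : Nat) : ∀ (l cur : List Char) (accs : List (List Char)),
    l.length < fuel →
    PySem.Chars.splitOn.go [':'] fuel l cur accs = accs.reverse ++ (pvSplit1 l).modifyHead (cur.reverse ++ ·) := by
  induction fuel with
  | zero => intro l cur accs h; omega
  | succ fuel ih =>
    intro l cur accs h
    cases l with
    | nil =>
      rw [PySem.Chars.splitOn.go.eq_def]
      simp [pvSplit1]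
    | cons c rest =>
      rw [PySem.Chars.splitOn.go.eq_def]
      by_cases hc : c = ':'
      · subst hc
        have hpre : [':'].isPrefixOf (':' :: rest) = true := by simp [List.isPrefixOf]
        simp only [hpre, if_pos]
        have hdrop : List.drop ([':'] : List Char).length (':' :: rest) = rest := rfl
        rw [hdrop, ih rest [] (cur.reverse :: accs) (by simp at h ⊢; omega)]
        cases h0 : pvSplit1 rest <;> simp [pvSplit1, h0]
      · have hpre : [':'].isPrefixOf (c :: rest) = false := by
          simp [List.isPrefixOf]
          exact fun hcc => absurd hcc.symm hc
        simp only [hpre, Bool.false_eq_true, if_neg, not_false_iff]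
        rw [ih rest (c :: cur) accs (by simp at h ⊢; omega)]
        cases hrest : pvSplit1 rest with
        | nil => exact absurd hrest (pvSplit1_ne_nil rest)
        | cons hd tl => simp [pvSplit1, hc, hrest, List.modifyHead]

theorem pvSplitOn_eq (cs : List Char) : PySem.Chars.splitOn cs [':'] = pvSplit1 cs := by
  unfold PySem.Chars.splitOn
  rw [pvSplitOn_go_eq (cs.length + 1) cs [] [] (by omega)]
  cases h : pvSplit1 cs with
  | nil => exact absurd h (pvSplit1_ne_nil cs)
  | cons hd tl => simp [List.modifyHead]

theorem pvSplit1_prefix (r : List Char) :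
    pvSplit1 ("#EXT-X-MOUFLON:PSCH:".toList ++ r) =
      "#EXT-X-MOUFLON".toList :: "PSCH".toList :: pvSplit1 r := by
  have h1 : ("#EXT-X-MOUFLON:PSCH:".toList ++ r) =
      "#EXT-X-MOUFLON".toList ++ ':' :: ("PSCH".toList ++ ':' :: r) := rfl
  have key : ∀ (t u : List Char), ':' ∉ t → pvSplit1 (t ++ ':' :: u) = t :: pvSplit1 u := by
    intro t
    induction t with
    | nil => intro u _; simp [pvSplit1]
    | cons c rest ih =>
      intro u h
      simp only [List.mem_cons, not_or] at h
      have hc : ¬ (c = ':') := fun hcc => h.1 hcc.symm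
      simp [pvSplit1, hc, ih u h.2, List.modifyHead]
  rw [h1, key _ _ (by decide), key _ _ (by decide)]

-- what a colon split的 head looks like: pvSplit1 against takeWhile/dropWhile
theorem pvSplit1_eq_cons (cs : List Char) :
    pvSplit1 cs = cs.takeWhile (fun c => c != ':') ::
      (if ':' ∈ cs then pvSplit1 ((cs.dropWhile (fun c => c != ':')).tail) else []) := by
  induction cs with
  | nil => simp [pvSplit1]
  | cons c rest ih =>
    by_cases hc : c = ':'
    · subst hc
      simp [pvSplit1, List.takeWhile_cons, List.dropWhile_cons]
    · have hne : (c != ':') = true := by simp [hc]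
      have hmem : (':' ∈ c :: rest) = (':' ∈ rest) := by
        simp [List.mem_cons, eq_comm, hc]
      simp [pvSplit1, hc, ih, hne, hmem, List.modifyHead]

-- per-line value of A's loop body (used only by the proofs)
def pvGA (line : String) : List (String × String) :=
  if PySem.Str.startswith line "#EXT-X-MOUFLON:PSCH:" then
    let parts := (PySem.Str.split? line ":").getD []
    if 4 ≤ parts.length then
      [(parts.getD 2 "", PySem.Str.strip (parts.getD 3 ""))]
    else []
  else []

theorem pvStepA_append (k : List (String × String)) (l : String) :
    pvStepA k l = k ++ pvGA l := by
  unfold pvStepA pvGA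
  split_ifs <;> simp
  split <;> simp

theorem get_mouflon_pkeys_eq_flatMap (s : String) :
    get_mouflon_pkeys s = (PySem.Str.splitlines s).flatMap pvGA := by
  unfold get_mouflon_pkeys
  have h : pvStepA = fun k l => k ++ pvGA l := funext fun k => funext fun l => pvStepA_append k l
  rw [h, PySem.List.foldl_append_eq_flatMap]
  simp

-- ---- splitlines, characterised by a head-line splitter ----
def pvLineSplit : List Char → List Char × List Char
  | [] => ([], [])
  | c :: cs =>
    if c = '\n' then ([], cs)
    else if c = '\r' then ([], if cs.head? = some '\n' then cs.tail else cs)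
    else let p := pvLineSplit cs; (c :: p.1, p.2)

theorem pvLineSplit_snd_le : ∀ (cs : List Char) (c : Char), ((pvLineSplit (c :: cs)).2).length ≤ cs.length := by
  intro cs
  induction cs with
  | nil =>
    intro c
    rw [pvLineSplit.eq_def]; dsimp only
    split_ifs <;> simp [pvLineSplit]
  | cons d ds ih =>
    intro c
    rw [pvLineSplit.eq_def]; dsimp only
    split_ifs with h1 h2 h3
    · simp
    · simp
    · simp
    · have := ih d
      simp at this ⊢; omega

def pvLines : List Char → List (List Char)
  | [] => []
  | c :: cs => (pvLineSplit (c :: cs)).1 :: pvLines (pvLineSplit (c :: cs)).2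
termination_by s => s.length
decreasing_by
  have := pvLineSplit_snd_le cs c
  simp; omega

-- the break/terminator shapes produced by pvLineSplit
def pvTerm (t r : List Char) : Prop :=
  t = ['\n'] ∨ t = ['\r', '\n'] ∨ (t = ['\r'] ∧ ∀ r', r ≠ '\n' :: r') ∨ (t = [] ∧ r = [])

theorem pvLineSplit_decomp (s : List Char) :
    (∀ c ∈ (pvLineSplit s).1, c ≠ '\n' ∧ c ≠ '\r') ∧
    ∃ t, s = (pvLineSplit s).1 ++ (t ++ (pvLineSplit s).2) ∧ pvTerm t (pvLineSplit s).2 := by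
  induction s with
  | nil => exact ⟨by simp [pvLineSplit], [], by simp [pvLineSplit, pvTerm]⟩
  | cons c cs ih =>
    rw [pvLineSplit.eq_def]; dsimp only
    by_cases h1 : c = '\n'
    · rw [if_pos h1]; subst h1
      exact ⟨by simp, ['\n'], by simp [pvTerm]⟩
    · rw [if_neg h1]
      by_cases h2 : c = '\x0d'
      · rw [if_pos h2]; subst h2
        cases cs with
        | nil => exact ⟨by simp, ['\x0d'], by simp, by simp [pvTerm]⟩
        | cons d ds =>
          by_cases hd : d = '\n'
          · subst hd
            exact ⟨by simp, ['\x0d', '\n'], by simp, by simp [pvTerm]⟩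
          · have hm : (if (d :: ds).head? = some '\n' then (d :: ds).tail else d :: ds) = d :: ds := by
              simp [hd]
            rw [hm]
            exact ⟨by simp, ['\x0d'], by simp,
              Or.inr (Or.inr (Or.inl ⟨rfl, fun r' hr => hd (by injection hr)⟩))⟩
      · rw [if_neg h2]
        obtain ⟨hbf, t, hs, ht⟩ := ih
        exact ⟨by simpa [h1, h2] using hbf, t, by simpa using hs, ht⟩

def pvIsB : Char → Bool := fun c =>
  decide (c.toNat = 10) || decide (c.toNat = 13) || decide (c.toNat = 11) || decide (c.toNat = 12) ||
    decide (c.toNat = 28) || decide (c.toNat = 29) || decide (c.toNat = 30) || decide (c.toNat = 133) ||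
    decide (c.toNat = 8232) || decide (c.toNat = 8233)

theorem pvChar_eq_iff_toNat (c d : Char) : c = d ↔ c.toNat = d.toNat := by
  constructor
  · rintro rfl; rfl
  · intro h; exact Char.ext (UInt32.toNat_inj.mp h)

theorem pvIsB_dom (c : Char) (h : pvDomChar c = true) :
    pvIsB c = (decide (c = '\n') || decide (c = '\r')) := by
  have h10 : (c = '\n') = (c.toNat = 10) := propext (pvChar_eq_iff_toNat c '\n')
  have h13 : (c = '\r') = (c.toNat = 13) := propext (pvChar_eq_iff_toNat c '\r')
  simp only [pvDomChar, Bool.or_eq_true, Bool.and_eq_true, decide_eq_true_eq,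
    Nat.beq_eq_true_eq] at h
  have hex : c.toNat ≠ 11 ∧ c.toNat ≠ 12 ∧ c.toNat ≠ 28 ∧ c.toNat ≠ 29 ∧ c.toNat ≠ 30 ∧
      c.toNat ≠ 133 ∧ c.toNat ≠ 8232 ∧ c.toNat ≠ 8233 := by omega
  simp [pvIsB, h10, h13, hex.1, hex.2.1, hex.2.2.1, hex.2.2.2.1, hex.2.2.2.2.1,
    hex.2.2.2.2.2.1, hex.2.2.2.2.2.2.1, hex.2.2.2.2.2.2.2]

-- the tail invariant: with an empty current line the if-form collapses to pvLines
theorem pvF_nil (cs : List Char) :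
    (if (([] : List Char).isEmpty ∧ cs.isEmpty) then ([] : List (List Char))
      else (([] : List Char).reverse ++ (pvLineSplit cs).1) :: pvLines (pvLineSplit cs).2) = pvLines cs := by
  cases cs with
  | nil => simp [pvLines]
  | cons c cs' => rw [pvLines]; simp

theorem splitlines_go_eq : ∀ (n : Nat), ∀ (cs cur : List Char) (acc : List (List Char)),
    cs.length ≤ n → (∀ c ∈ cs, pvDomChar c) →
    PySem.Chars.splitlines.go pvIsB cs cur acc =
      acc.reverse ++ (if cur.isEmpty ∧ cs.isEmpty then []
        else (cur.reverse ++ (pvLineSplit cs).1) :: pvLines (pvLineSplit cs).2) := by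
  intro n
  induction n with
  | zero =>
    intro cs cur acc h hd
    have : cs = [] := by cases cs <;> simp_all
    subst this
    rw [PySem.Chars.splitlines.go.eq_def]
    by_cases hc : cur.isEmpty <;> simp_all [pvLineSplit, pvLines]
  | succ n ih =>
    intro cs cur acc h hd
    rw [PySem.Chars.splitlines.go.eq_def]
    split
    · -- cs = []
      by_cases hc : cur.isEmpty <;> simp_all [pvLineSplit, pvLines]
    · -- cs = '\r' :: '\n' :: rest
      rename_i rest
      have hsplit : pvLineSplit ('\x0d' :: '\n' :: rest) = ([], rest) := by
        simp [pvLineSplit]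
      rw [ih rest [] _ (by simp at h ⊢; omega) (fun c hc => hd c (by simp [hc])), pvF_nil]
      simp [hsplit]
    · -- cs = c :: rest, not starting with '\r\n'
      rename_i c rest hne
      have hdc : pvDomChar c = true := hd c (by simp)
      have hrest : ∀ x ∈ rest, pvDomChar x = true := fun x hx => hd x (by simp [hx])
      have hlen : rest.length ≤ n := by simp at h; omega
      rw [pvIsB_dom c hdc]
      by_cases h1 : c = '\n'
      · subst h1
        rw [if_pos (by simp)]
        have hsplit : pvLineSplit ('\n' :: rest) = ([], rest) := by simp [pvLineSplit]
        rw [ih rest [] _ hlen hrest, pvF_nil]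
        simp [hsplit]
      · by_cases h2 : c = '\x0d'
        · subst h2
          rw [if_pos (by simp)]
          have hm : (if rest.head? = some '\n' then rest.tail else rest) = rest := by
            cases rest with
            | nil => rfl
            | cons d ds =>
              by_cases hd : d = '\n'
              · subst hd; exact absurd rfl (hne ds rfl)
              · simp [hd]
          have hsplit : pvLineSplit ('\x0d' :: rest) = ([], rest) := by
            rw [pvLineSplit.eq_def]; dsimp only
            rw [if_neg (by decide), if_pos rfl, hm]
          rw [ih rest [] _ hlen hrest, pvF_nil]
          simp [hsplit]
        · rw [if_neg (by simp [h1, h2])]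
          have hsplit : pvLineSplit (c :: rest) =
              (c :: (pvLineSplit rest).1, (pvLineSplit rest).2) := by
            rw [pvLineSplit.eq_def]; dsimp only
            rw [if_neg h1, if_neg h2]
          rw [ih rest (c :: cur) _ hlen hrest]
          simp [hsplit]

theorem splitlines_eq_pvLines (cs : List Char) (h : ∀ c ∈ cs, pvDomChar c) :
    PySem.Chars.splitlines cs = pvLines cs := by
  have h0 : PySem.Chars.splitlines cs = PySem.Chars.splitlines.go pvIsB cs [] [] := rfl
  rw [h0, splitlines_go_eq cs.length cs [] [] le_rfl h, pvF_nil]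
  simp

theorem pvLines_bf : ∀ (n : Nat) (cs : List Char), cs.length ≤ n →
    ∀ l ∈ pvLines cs, ∀ c ∈ l, c ≠ '\n' ∧ c ≠ '\r' := by
  intro n
  induction n with
  | zero =>
    intro cs h
    have : cs = [] := by cases cs <;> simp_all
    subst this; simp [pvLines]
  | succ n ih =>
    intro cs h l hl
    cases cs with
    | nil => simp [pvLines] at hl
    | cons c cs' =>
      rw [pvLines] at hl
      rcases List.mem_cons.mp hl with h1 | h2
      · subst h1; exact (pvLineSplit_decomp (c :: cs')).1
      · have hlt := pvLineSplit_snd_le cs' c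
        exact ih _ (by simp at h; omega) l h2

-- ---- B-side: how the scanners act across a line boundary ----
-- a terminator (or end of input) never begins with a non-break char
theorem pvTerm_head (t r : List Char) (ht : pvTerm t r) (c : Char)
    (hc : c ≠ '\n' ∧ c ≠ '\r') :
    (t ++ r = [] ∧ r = []) ∨ ∃ b rest, t ++ r = b :: rest ∧ b ≠ c := by
  rcases ht with h | h | ⟨h, _⟩ | ⟨h, hr⟩ <;> subst h
  · exact Or.inr ⟨'\n', r, rfl, fun hb => hc.1 hb.symm⟩
  · exact Or.inr ⟨'\x0d', '\n' :: r, rfl, fun hb => hc.2 hb.symm⟩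
  · exact Or.inr ⟨'\x0d', r, rfl, fun hb => hc.2 hb.symm⟩
  · subst hr; exact Or.inl ⟨rfl, rfl⟩

theorem pvPref_append (pat l t r : List Char)
    (hpat : ∀ c ∈ pat, c ≠ '\n' ∧ c ≠ '\r')
    (hl : ∀ c ∈ l, c ≠ '\n' ∧ c ≠ '\r') (ht : pvTerm t r) :
    pvPref pat (l ++ (t ++ r)) = ((pvPref pat l).1, (pvPref pat l).2 ++ (t ++ r)) := by
  induction l generalizing pat with
  | nil =>
    cases pat with
    | nil => simp [pvPref]
    | cons p ps =>
      rcases pvTerm_head t r ht p (hpat p (by simp)) with ⟨h1, h2⟩ | ⟨b, rest, h1, h2⟩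
      · simp [h1, pvPref]
      · simp only [List.nil_append, h1, pvPref]
        rw [if_neg h2]
  | cons a l' ih =>
    cases pat with
    | nil => simp [pvPref]
    | cons p ps =>
      by_cases hap : a = p
      · simp only [List.cons_append, pvPref, if_pos hap]
        exact ih ps (fun c hc => hpat c (by simp [hc])) (fun c hc => hl c (by simp [hc]))
      · simp [pvPref, hap]

theorem pvTakeField_append (l t r : List Char)
    (hl : ∀ c ∈ l, c ≠ '\n' ∧ c ≠ '\r') (ht : pvTerm t r) :
    pvTakeField (l ++ (t ++ r)) = ((pvTakeField l).1, (pvTakeField l).2 ++ (t ++ r)) := by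
  induction l with
  | nil =>
    rcases ht with h | h | ⟨h, _⟩ | ⟨h, hr⟩ <;> subst h
    · simp [pvTakeField]
    · simp [pvTakeField]
    · simp [pvTakeField]
    · subst hr; simp [pvTakeField]
  | cons a l' ih =>
    by_cases ha : a = ':' ∨ a = '\x0d' ∨ a = '\n'
    · simp [pvTakeField, ha]
    · simp only [List.cons_append, pvTakeField, if_neg ha]
      rw [ih (fun c hc => hl c (by simp [hc]))]

theorem pvSkipLine_append (l t r : List Char)
    (hl : ∀ c ∈ l, c ≠ '\n' ∧ c ≠ '\r') (ht : pvTerm t r) :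
    pvSkipLine (l ++ (t ++ r)) = r := by
  induction l with
  | nil =>
    rcases ht with h | h | ⟨h, hr⟩ | ⟨h, hr⟩ <;> subst h
    · simp [pvSkipLine]
    · simp [pvSkipLine]
    · cases r with
      | nil => simp [pvSkipLine]
      | cons d ds =>
        have hd : d ≠ '\n' := fun hd => hr ds (by rw [hd])
        simp [pvSkipLine, hd]
    · subst hr; simp [pvSkipLine]
  | cons a l' ih =>
    have ha := hl a (by simp)
    simp only [List.cons_append, pvSkipLine, if_neg ha.1, if_neg ha.2]
    exact ih (fun c hc => hl c (by simp [hc]))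

theorem pvPref_snd_suffix (pat l : List Char) : (pvPref pat l).2 <:+ l := by
  induction pat generalizing l with
  | nil => simp [pvPref]
  | cons p ps ih =>
    cases l with
    | nil => simp [pvPref]
    | cons c cs =>
      by_cases h : c = p
      · simp only [pvPref, if_pos h]
        exact (ih cs).trans (List.suffix_cons c cs)
      · simp [pvPref, h]

theorem pvTakeField_snd_suffix (l : List Char) : (pvTakeField l).2 <:+ l := by
  induction l with
  | nil => simp [pvTakeField]
  | cons c cs ih =>
    by_cases h : c = ':' ∨ c = '\x0d' ∨ c = '\n'
    · simp [pvTakeField, h]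
    · simp only [pvTakeField, if_neg h]
      exact ih.trans (List.suffix_cons c cs)

-- per-line value of B's scanner (used only by the proofs)
def pvGB (l : List Char) : List (String × String) :=
  let pr := pvPref pvTag l
  if pr.1 then
    let f1 := pvTakeField pr.2
    if f1.2.head? = some ':' then
      [(String.ofList f1.1, PySem.Str.strip (String.ofList (pvTakeField f1.2.tail).1))]
    else []
  else []

theorem pvBF_suffix {l m : List Char} (h : m <:+ l)
    (hbf : ∀ c ∈ l, c ≠ '\n' ∧ c ≠ '\x0d') : ∀ c ∈ m, c ≠ '\n' ∧ c ≠ '\x0d' :=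
  fun c hc => hbf c (h.subset hc)

theorem pvTakeField_snd_shape (l : List Char) (hbf : ∀ c ∈ l, c ≠ '\n' ∧ c ≠ '\x0d') :
    (pvTakeField l).2 = [] ∨ ∃ m, (pvTakeField l).2 = ':' :: m := by
  induction l with
  | nil => exact Or.inl (by simp [pvTakeField])
  | cons c cs ih =>
    by_cases h : c = ':' ∨ c = '\x0d' ∨ c = '\n'
    · have hc := hbf c (by simp)
      have hcol : c = ':' := by
        rcases h with h | h | h
        · exact h
        · exact absurd h hc.2
        · exact absurd h hc.1
      subst hcol
      exact Or.inr ⟨cs, by simp [pvTakeField]⟩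
    · simp only [pvTakeField, if_neg h]
      exact ih (fun x hx => hbf x (by simp [hx]))

theorem pvTag_bf : ∀ x ∈ pvTag, x ≠ '\n' ∧ x ≠ '\x0d' := by
  have h : pvTag = ['#','E','X','T','-','X','-','M','O','U','F','L','O','N',':','P','S','C','H',':'] := by decide
  rw [h]
  intro x hx
  simp only [List.mem_cons, List.not_mem_nil, or_false] at hx
  rcases hx with h|h|h|h|h|h|h|h|h|h|h|h|h|h|h|h|h|h|h|h <;> subst h <;> exact ⟨by decide, by decide⟩

theorem pvScanB_flat : ∀ (n : Nat) (cs : List Char), cs.length ≤ n →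
    pvScanB cs = (pvLines cs).flatMap pvGB := by
  intro n
  induction n with
  | zero =>
    intro cs h
    have : cs = [] := by cases cs <;> simp_all
    subst this; simp [pvScanB, pvLines]
  | succ n ih =>
    intro cs h
    cases cs with
    | nil => simp [pvScanB, pvLines]
    | cons c cs' =>
      obtain ⟨hbf, t, hs, ht⟩ := pvLineSplit_decomp (c :: cs')
      have hlenR : (pvLineSplit (c :: cs')).2.length ≤ n := by
        have := pvLineSplit_snd_le cs' c; simp at h; omega
      have hRflat := ih _ hlenR
      have htag : ∀ x ∈ pvTag, x ≠ '\n' ∧ x ≠ '\x0d' := pvTag_bf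
      have hpr : pvPref pvTag (c :: cs') =
          ((pvPref pvTag (pvLineSplit (c :: cs')).1).1,
           (pvPref pvTag (pvLineSplit (c :: cs')).1).2 ++ (t ++ (pvLineSplit (c :: cs')).2)) := by
        conv_lhs => rw [hs]
        exact pvPref_append pvTag _ t _ htag hbf ht
      have hm0bf : ∀ x ∈ (pvPref pvTag (pvLineSplit (c :: cs')).1).2, x ≠ '\n' ∧ x ≠ '\x0d' :=
        pvBF_suffix (pvPref_snd_suffix pvTag _) hbf
      have hf1 : pvTakeField ((pvPref pvTag (pvLineSplit (c :: cs')).1).2 ++ (t ++ (pvLineSplit (c :: cs')).2)) =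
          ((pvTakeField (pvPref pvTag (pvLineSplit (c :: cs')).1).2).1,
           (pvTakeField (pvPref pvTag (pvLineSplit (c :: cs')).1).2).2 ++ (t ++ (pvLineSplit (c :: cs')).2)) :=
        pvTakeField_append _ t _ hm0bf ht
      have hlines : pvLines (c :: cs') = (pvLineSplit (c :: cs')).1 :: pvLines (pvLineSplit (c :: cs')).2 := by
        rw [pvLines]
      rw [pvScanB.eq_def]
      dsimp only
      rw [hlines, List.flatMap_cons, hpr, ← hRflat, hf1]
      by_cases hb : (pvPref pvTag (pvLineSplit (c :: cs')).1).1 = true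
      · rw [if_pos hb]
        rcases pvTakeField_snd_shape _ hm0bf with hsh | ⟨m1, hsh⟩
        · -- the psch scan ran to the end of the line: no colon, nothing appended
          have hhead : ¬ ((t ++ (pvLineSplit (c :: cs')).2).head? = some ':') := by
            rcases ht with h' | h' | ⟨h', _⟩ | ⟨h', hr⟩
            · subst h'; simp
            · subst h'; simp
            · subst h'; simp
            · subst h'; simp [hr]
          have hGB : pvGB (pvLineSplit (c :: cs')).1 = [] := by
            simp [pvGB, hb, hsh]
          have hskip0 : pvSkipLine (t ++ (pvLineSplit (c :: cs')).2) = (pvLineSplit (c :: cs')).2 := by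
            have := pvSkipLine_append [] t _ (by simp) ht
            simpa using this
          rw [hsh, List.nil_append, if_neg hhead, hGB, hskip0]
          simp
        · -- a colon follows the psch field: one pair appended
          rw [hsh]
          have hm1bf : ∀ x ∈ m1, x ≠ '\n' ∧ x ≠ '\x0d' := by
            have hsuf : ':' :: m1 <:+ (pvPref pvTag (pvLineSplit (c :: cs')).1).2 := by
              rw [← hsh]; exact pvTakeField_snd_suffix _
            intro x hx
            exact pvBF_suffix hsuf hm0bf x (by simp [hx])
          have hf2 : pvTakeField (m1 ++ (t ++ (pvLineSplit (c :: cs')).2)) =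
              ((pvTakeField m1).1, (pvTakeField m1).2 ++ (t ++ (pvLineSplit (c :: cs')).2)) :=
            pvTakeField_append _ t _ hm1bf ht
          have hskip : pvSkipLine ((pvTakeField m1).2 ++ (t ++ (pvLineSplit (c :: cs')).2)) =
              (pvLineSplit (c :: cs')).2 :=
            pvSkipLine_append _ t _ (pvBF_suffix (pvTakeField_snd_suffix m1) hm1bf) ht
          have hGB : pvGB (pvLineSplit (c :: cs')).1 =
              [(String.ofList (pvTakeField (pvPref pvTag (pvLineSplit (c :: cs')).1).2).1,
                PySem.Str.strip (String.ofList (pvTakeField m1).1))] := by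
            simp only [pvGB, hb, hsh, if_true, List.head?_cons, List.tail_cons]
          rw [List.cons_append, List.head?_cons, if_pos rfl, List.tail_cons, hf2, hskip, hGB,
            List.singleton_append]
      · have hbf' : (pvPref pvTag (pvLineSplit (c :: cs')).1).1 = false := by
          cases hq : (pvPref pvTag (pvLineSplit (c :: cs')).1).1
          · rfl
          · exact absurd hq hb
        have hGB : pvGB (pvLineSplit (c :: cs')).1 = [] := by
          simp [pvGB, hbf']
        rw [if_neg (by simp [hbf']), hGB, pvSkipLine_append _ t _ hm0bf ht]
        simp

-- ---- per line, B's scanner computes A's split-and-index value ----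
theorem pvPref_of_prefix : ∀ (pat rest : List Char), pvPref pat (pat ++ rest) = (true, rest) := by
  intro pat
  induction pat with
  | nil => intro rest; simp [pvPref]
  | cons p ps ih => intro rest; simp [pvPref, ih]

theorem pvPref_fst_false : ∀ (pat l : List Char), (¬ ∃ rest, l = pat ++ rest) →
    (pvPref pat l).1 = false := by
  intro pat
  induction pat with
  | nil => intro l h; exact absurd ⟨l, rfl⟩ h
  | cons p ps ih =>
    intro l h
    cases l with
    | nil => simp [pvPref]
    | cons c cs =>
      by_cases hc : c = p
      · subst hc
        simp only [pvPref, if_pos rfl]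
        exact ih cs (fun ⟨rest, hr⟩ => h ⟨rest, by simp [hr]⟩)
      · simp [pvPref, hc]

theorem pvTakeField_bf (l : List Char) (hbf : ∀ c ∈ l, c ≠ '\n' ∧ c ≠ '\x0d') :
    pvTakeField l = (l.takeWhile (fun c => c != ':'), l.dropWhile (fun c => c != ':')) := by
  induction l with
  | nil => simp [pvTakeField]
  | cons c cs ih =>
    by_cases h : c = ':' ∨ c = '\x0d' ∨ c = '\n'
    · have hc := hbf c (by simp)
      have hcol : c = ':' := by
        rcases h with h | h | h
        · exact h
        · exact absurd h hc.2
        · exact absurd h hc.1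
      subst hcol
      simp [pvTakeField]
    · have hne : (c != ':') = true := by
        simp only [bne_iff_ne, ne_eq]
        exact fun hc => h (Or.inl hc)
      simp only [pvTakeField, if_neg h, ih (fun x hx => hbf x (by simp [hx]))]
      simp [hne]

theorem pvDropWhile_shape : ∀ l : List Char,
    l.dropWhile (fun c => c != ':') = [] ∨ ∃ u, l.dropWhile (fun c => c != ':') = ':' :: u := by
  intro l
  induction l with
  | nil => exact Or.inl (by simp)
  | cons c cs ih =>
    by_cases hc : c = ':'
    · subst hc; exact Or.inr ⟨cs, by simp⟩
    · have hne : (c != ':') = true := by simp [hc]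
      rw [List.dropWhile_cons, if_pos hne]
      exact ih

theorem pvGB_eq_pvGA (l : List Char) (hbf : ∀ c ∈ l, c ≠ '\n' ∧ c ≠ '\x0d') :
    pvGB l = pvGA (String.ofList l) := by
  have hsw : PySem.Str.startswith (String.ofList l) "#EXT-X-MOUFLON:PSCH:" = true ↔
      ∃ rest, l = pvTag ++ rest := by
    rw [PySem.Str.startswith_eq, PySem.Chars.startswith_iff]
    simp only [String.toList_ofList]
    constructor
    · rintro ⟨t, ht⟩; exact ⟨t, ht.symm⟩
    · rintro ⟨t, ht⟩; exact ⟨t, ht.symm⟩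
  by_cases hex : ∃ rest, l = pvTag ++ rest
  · obtain ⟨rest, hrest⟩ := hex
    subst hrest
    have hrbf : ∀ c ∈ rest, c ≠ '\n' ∧ c ≠ '\x0d' :=
      fun c hc => hbf c (by simp [hc])
    have hparts : (PySem.Str.split? (String.ofList (pvTag ++ rest)) ":").getD [] =
        List.map String.ofList ("#EXT-X-MOUFLON".toList :: "PSCH".toList :: pvSplit1 rest) := by
      unfold PySem.Str.split? PySem.Chars.split?
      rw [show ((":" : String).toList) = [':'] from rfl]
      rw [if_neg (by decide : ¬ (([':'] : List Char).isEmpty = true))]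
      rw [show (String.ofList (pvTag ++ rest)).toList = "#EXT-X-MOUFLON:PSCH:".toList ++ rest from by simp [pvTag]]
      rw [pvSplitOn_eq, pvSplit1_prefix]
      rfl
    unfold pvGB pvGA
    rw [if_pos (hsw.mpr ⟨rest, rfl⟩), hparts, pvPref_of_prefix]
    dsimp only
    rw [pvTakeField_bf rest hrbf]
    by_cases hm : ':' ∈ rest
    · -- a colon after the tag: both produce the pair
      obtain ⟨u, hu⟩ : ∃ u, rest.dropWhile (fun c => c != ':') = ':' :: u := by
        rcases pvDropWhile_shape rest with hnil | hok
        · exfalso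
          have := List.takeWhile_append_dropWhile (p := fun c => c != ':') (l := rest)
          rw [hnil, List.append_nil] at this
          rw [← this] at hm
          have := List.mem_takeWhile_imp hm
          simp at this
        · exact hok
      have hubf : ∀ c ∈ u, c ≠ '\n' ∧ c ≠ '\x0d' := by
        intro c hc
        have hsub : u ⊆ rest := by
          intro x hx
          have : x ∈ rest.dropWhile (fun c => c != ':') := by rw [hu]; simp [hx]
          exact List.dropWhile_subset _ this
        exact hrbf c (hsub hc)
      rw [hu]
      simp only [List.head?_cons, List.tail_cons]
      rw [pvTakeField_bf u hubf]
      have hsplit : pvSplit1 rest = rest.takeWhile (fun c => c != ':') :: pvSplit1 u := by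
        rw [pvSplit1_eq_cons rest, if_pos hm, hu, List.tail_cons]
      rw [hsplit]
      have hlen : 4 ≤ (List.map String.ofList
          ("#EXT-X-MOUFLON".toList :: "PSCH".toList :: rest.takeWhile (fun c => c != ':') :: pvSplit1 u)).length := by
        cases h0 : pvSplit1 u with
        | nil => exact absurd h0 (pvSplit1_ne_nil u)
        | cons x xs => simp
      rw [if_pos hlen]
      have hget2 : (List.map String.ofList
          ("#EXT-X-MOUFLON".toList :: "PSCH".toList :: rest.takeWhile (fun c => c != ':') :: pvSplit1 u)).getD 2 "" =
          String.ofList (rest.takeWhile (fun c => c != ':')) := by simp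
      have hget3 : (List.map String.ofList
          ("#EXT-X-MOUFLON".toList :: "PSCH".toList :: rest.takeWhile (fun c => c != ':') :: pvSplit1 u)).getD 3 "" =
          String.ofList (u.takeWhile (fun c => c != ':')) := by
        cases h0 : pvSplit1 u with
        | nil => exact absurd h0 (pvSplit1_ne_nil u)
        | cons x xs =>
          have hx : x = u.takeWhile (fun c => c != ':') := by
            have := pvSplit1_eq_cons u
            rw [h0] at this
            exact (List.cons.injEq _ _ _ _ ▸ this).1
          simp [hx]
      rw [hget2, hget3]
      simp
    · -- no colon after the tag: both skip the line
      have hdw : rest.dropWhile (fun c => c != ':') = [] := by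
        rw [List.dropWhile_eq_nil_iff]
        intro x hx
        simp only [bne_iff_ne, ne_eq]
        exact fun hc => hm (hc ▸ hx)
      have hsplit : pvSplit1 rest = [rest.takeWhile (fun c => c != ':')] := by
        rw [pvSplit1_eq_cons rest, if_neg hm]
      rw [hdw, hsplit]
      simp
  · unfold pvGB pvGA
    dsimp only
    rw [if_neg (fun hsw' => hex (hsw.mp hsw')), pvPref_fst_false pvTag l hex]
    simp

theorem pvFlatMap_congr {α β : Type} (f g : α → List β) :
    ∀ (xs : List α), (∀ x ∈ xs, f x = g x) → xs.flatMap f = xs.flatMap g := by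
  intro xs
  induction xs with
  | nil => intro _; rfl
  | cons x xs ih =>
    intro h
    simp only [List.flatMap_cons, h x (by simp), ih (fun y hy => h y (by simp [hy]))]

-- ===== VERDICT (by name: the statement is the Claim_ definition above) =====
theorem get_mouflon_pkeys_spec : Claim_equal_get_mouflon_pkeys := by
  intro s hdom
  unfold Spec_get_mouflon_pkeys get_mouflon_pkeys_alt
  rw [get_mouflon_pkeys_eq_flatMap]
  unfold PySem.Str.splitlines
  have hchars : ∀ c ∈ s.toList, pvDomChar c := by
    have : pvDomStr s = true := hdom
    simpa [pvDomStr, List.all_eq_true] using this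
  rw [splitlines_eq_pvLines s.toList hchars]
  rw [List.flatMap_map]
  rw [pvScanB_flat s.toList.length s.toList le_rfl]
  exact pvFlatMap_congr _ _ _ (fun l hl =>
    (pvGB_eq_pvGA l (pvLines_bf s.toList.length s.toList le_rfl l hl)).symm)
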